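-- pv_equiv track=rewrite | github.com/umass-ai-safety/colosseum | experiments/persuasion/hospital/plots/plot_persuasion_variants.py | _variant_order
-- ===== SOURCE A (Python) =====
-- from typing import Any, Dict, List, Optional
--
-- def _variant_order(rows: List[Dict[str, Any]]) -> List[str]:
--     preferred = [
--         "control",
--         "helpful_misdirection",
--         "authority_nudge",
--         "social_proof",
--         "scarcity_pressure",
--         "reciprocity_trade",
--     ]
--     present = []
--     seen = set()
--     for r in rows:
--         v = str(r.get("prompt_variant") or "").strip()
--         if not v or v in seen:
--             continue
--         present.append(v)
--         seen.add(v)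
--     out: List[str] = []
--     for v in preferred:
--         if v in seen:
--             out.append(v)
--     for v in present:
--         if v not in out:
--             out.append(v)
--     return out
-- ===== SOURCE B (Python) =====
-- from typing import Any, Dict, List
--
-- def _variant_order(rows: List[Dict[str, Any]]) -> List[str]:
--     preferred = [
--         "control",
--         "helpful_misdirection",
--         "authority_nudge",
--         "social_proof",
--         "scarcity_pressure",
--         "reciprocity_trade",
--     ]
--     rank = {name: i for i, name in enumerate(preferred)}
--     order: Dict[str, int] = {}
--     for r in rows:
--         v = str(r.get("prompt_variant") or "").strip()
--         if v and v not in order: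
--             order[v] = len(order)
--     n = len(order)
--     # single priority sort: preferred rank first, appearance index breaks ties
--     return sorted(order, key=lambda v: rank.get(v, len(preferred)) * (n + 1) + order[v])
-- ===== Notes on version B (the rewrite author's own statement) =====
-- stated objective: alternative
-- what changed: A's two sequential output passes (append preferred-present, then append the remaining in appearance order) are replaced by one dedup dict recording appearance indices and a single priority sort by (preferred rank, appearance index) encoded as one integer key.
import Mathlib
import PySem

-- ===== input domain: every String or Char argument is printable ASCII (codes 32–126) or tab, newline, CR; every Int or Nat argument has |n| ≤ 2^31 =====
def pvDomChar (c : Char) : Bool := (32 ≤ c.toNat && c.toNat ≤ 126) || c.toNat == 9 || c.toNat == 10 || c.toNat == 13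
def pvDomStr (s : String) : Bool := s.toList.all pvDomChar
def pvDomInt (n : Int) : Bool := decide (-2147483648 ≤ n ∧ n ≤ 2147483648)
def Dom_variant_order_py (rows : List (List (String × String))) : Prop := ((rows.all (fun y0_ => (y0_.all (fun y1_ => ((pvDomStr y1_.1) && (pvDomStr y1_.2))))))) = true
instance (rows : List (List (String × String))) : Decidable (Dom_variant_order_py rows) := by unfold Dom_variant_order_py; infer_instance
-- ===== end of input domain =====

-- B replaces A's two sequential output passes with one appearance-index dict and a single
-- priority sort by (preferred rank, appearance index); same return value, alternative algorithm.

-- ===== PORT A =====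
-- `str(r.get("prompt_variant") or "").strip()`: a missing key gives "", and `s or ""` is `s`
-- unless s = "" (the only falsy str), which is exactly `Option.getD ""`; str(s) = s on strings.
def pvGetVariant (r : List (String × String)) : String :=
  PySem.Str.strip (((PySem.Dict.mk r).get? "prompt_variant").getD "")


def variant_order_py (rows : List (List (String × String))) : List String :=
  let preferred : List String :=
    ["control", "helpful_misdirection", "authority_nudge", "social_proof",
     "scarcity_pressure", "reciprocity_trade"]
  let ps : List String × PySem.Set String :=
    rows.foldl (fun ps r =>
      let v := pvGetVariant r
      if v = "" ∨ v ∈ ps.2 then ps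
      else (ps.1 ++ [v], PySem.Set.add ps.2 v)) ([], PySem.Set.empty)
  let out1 : List String :=
    preferred.foldl (fun out v => if v ∈ ps.2 then out ++ [v] else out) []
  ps.1.foldl (fun out v => if v ∈ out then out else out ++ [v]) out1


-- ===== PORT B =====
def variant_order_py_alt (rows : List (List (String × String))) : List String :=
  let preferred : List String :=
    ["control", "helpful_misdirection", "authority_nudge", "social_proof",
     "scarcity_pressure", "reciprocity_trade"]
  let rank : PySem.Dict String Int :=
    (PySem.List.enumerate preferred 0).foldl (fun d p => d.insert p.2 p.1) PySem.Dict.empty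
  let order : PySem.Dict String Int :=
    rows.foldl (fun d r =>
      let v := pvGetVariant r
      if v ≠ "" ∧ d.contains v = false then d.insert v (d.size : Int) else d)
      PySem.Dict.empty
  let n : Int := (order.size : Int)
  PySem.List.sorted order.keys
    (fun v => (PySem.Dict.getD rank v (preferred.length : Int)) * (n + 1) + PySem.Dict.getD order v 0)
    false


-- ===== PRECONDITION & SPEC =====
def Spec_variant_order_py (rows : List (List (String × String))) (out : List String) : Prop := out = variant_order_py_alt rows
instance (rows : List (List (String × String))) (out : List String) : Decidable (Spec_variant_order_py rows out) := by unfold Spec_variant_order_py; infer_instance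

-- ===== CLAIM (what is proved, stated in full; the proofs are below) =====
def Claim_equal_variant_order_py : Prop := ∀ (rows : List (List (String × String))), Dom_variant_order_py rows → Spec_variant_order_py rows (variant_order_py rows)

-- ===== LEMMAS AND PROOFS =====

-- B's order dict after a prefix of rows has produced the distinct-variant list p
def pvDictOf (p : List String) : PySem.Dict String Int :=
  PySem.Dict.mk ((PySem.List.enumerate p 0).map (fun q => (q.2, q.1)))

theorem pvDictOf_keys (p : List String) : (pvDictOf p).keys = p := by
  have h : (pvDictOf p).keys = ((PySem.List.enumerate p 0).map (fun q => (q.2, q.1))).map (·.1) := rfl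
  rw [h, List.map_map]
  exact PySem.List.map_snd_enumerate p 0

theorem pvDictOf_contains (p : List String) (v : String) :
    (pvDictOf p).contains v = true ↔ v ∈ p := by
  rw [PySem.Dict.contains_iff_mem_keys, pvDictOf_keys]

theorem pvDictOf_size (p : List String) : (pvDictOf p).size = p.length := by
  have h : (pvDictOf p).size = ((PySem.List.enumerate p 0).map (fun q => (q.2, q.1))).length := rfl
  rw [h, List.length_map, PySem.List.length_enumerate]

theorem pvDictOf_insert (p : List String) (v : String) (hv : v ∉ p) :
    (pvDictOf p).insert v ((pvDictOf p).size : Int) = pvDictOf (p ++ [v]) := by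
  apply PySem.Dict.ext
  have hc : (pvDictOf p).contains v = false := by
    rcases Bool.eq_false_or_eq_true ((pvDictOf p).contains v) with h | h
    · exact absurd ((pvDictOf_contains p v).mp h) hv
    · exact h
  rw [PySem.Dict.items_insert_of_not_contains _ _ hc]
  show (pvDictOf p).items ++ _ = ((PySem.List.enumerate (p ++ [v]) 0).map (fun q => (q.2, q.1)))
  rw [PySem.List.enumerate_append, List.map_append, pvDictOf_size]
  simp [PySem.List.enumerate, pvDictOf]

theorem pvDictOf_getD (p : List String) (hp : p.Nodup) (i : Nat) (hi : i < p.length) :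
    (pvDictOf p).getD p[i] 0 = (i : Int) := by
  apply PySem.Dict.getD_of_mem_items
  · show (p[i], (i:Int)) ∈ (PySem.List.enumerate p 0).map (fun q => (q.2, q.1))
    refine List.mem_map.mpr ⟨((i:Int), p[i]), ?_, rfl⟩
    rw [PySem.List.mem_enumerate_iff]
    exact ⟨i, hi, by simp⟩
  · rw [pvDictOf_keys]; exact hp

theorem pvLoopCorr (rows : List (List (String × String))) (p : List String)
    (hnd : p.Nodup) :
    ∃ P : List String, P.Nodup ∧
      rows.foldl (fun ps r =>
        let v := pvGetVariant r
        if v = "" ∨ v ∈ ps.2 then ps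
        else (ps.1 ++ [v], PySem.Set.add ps.2 v)) (p, (p : PySem.Set String)) = (P, P) ∧
      rows.foldl (fun d r =>
        let v := pvGetVariant r
        if v ≠ "" ∧ d.contains v = false then d.insert v (d.size : Int) else d)
        (pvDictOf p) = pvDictOf P := by
  induction rows generalizing p with
  | nil => exact ⟨p, hnd, rfl, rfl⟩
  | cons r rows ih =>
    simp only [List.foldl_cons]
    by_cases h : pvGetVariant r = "" ∨ pvGetVariant r ∈ p
    · have hA : (if pvGetVariant r = "" ∨ pvGetVariant r ∈ ((p : PySem.Set String)) then (p, (p : PySem.Set String))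
          else (p ++ [pvGetVariant r], PySem.Set.add p (pvGetVariant r))) = (p, (p : PySem.Set String)) := if_pos h
      have hB : (if pvGetVariant r ≠ "" ∧ (pvDictOf p).contains (pvGetVariant r) = false
          then (pvDictOf p).insert (pvGetVariant r) ((pvDictOf p).size : Int) else pvDictOf p) = pvDictOf p := by
        apply if_neg
        rintro ⟨h1, h2⟩
        rcases h with h | h
        · exact h1 h
        · rw [(pvDictOf_contains p _).mpr h] at h2; cases h2
      simpa only [hA, hB] using ih p hnd
    · rw [not_or] at h
      obtain ⟨h1, h2⟩ := h
      have h2' : pvGetVariant r ∉ p := h2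
      have hc : (pvDictOf p).contains (pvGetVariant r) = false := by
        rcases Bool.eq_false_or_eq_true ((pvDictOf p).contains (pvGetVariant r)) with hc | hc
        · exact absurd ((pvDictOf_contains p _).mp hc) h2'
        · exact hc
      have hA : (if pvGetVariant r = "" ∨ pvGetVariant r ∈ ((p : PySem.Set String)) then (p, (p : PySem.Set String))
          else (p ++ [pvGetVariant r], PySem.Set.add p (pvGetVariant r))) = (p ++ [pvGetVariant r], p ++ [pvGetVariant r]) := by
        rw [if_neg (by rintro (h | h); exacts [h1 h, h2' h]), PySem.Set.add_of_not_mem h2']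
      have hB : (if pvGetVariant r ≠ "" ∧ (pvDictOf p).contains (pvGetVariant r) = false
          then (pvDictOf p).insert (pvGetVariant r) ((pvDictOf p).size : Int) else pvDictOf p)
          = pvDictOf (p ++ [pvGetVariant r]) := by
        rw [if_pos ⟨h1, hc⟩, pvDictOf_insert p _ h2']
      have hnd' : (p ++ [pvGetVariant r]).Nodup := by
        rw [List.nodup_append]
        refine ⟨hnd, List.nodup_singleton _, ?_⟩
        intro a ha b hb
        simp only [List.mem_singleton] at hb
        subst hb
        exact fun e => h2' (e ▸ ha)
      simpa only [hA, hB] using ih (p ++ [pvGetVariant r]) hnd'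

theorem pvFoldDedup (p : List String) : ∀ (out1 : List String), p.Nodup →
    p.foldl (fun out v => if v ∈ out then out else out ++ [v]) out1
      = out1 ++ p.filter (fun v => !decide (v ∈ out1)) := by
  induction p with
  | nil => simp
  | cons x p ih =>
    intro out1 hnd
    rw [List.foldl_cons]
    have hx : x ∉ p := (List.nodup_cons.mp hnd).1
    by_cases hmem : x ∈ out1
    · rw [if_pos hmem, List.filter_cons_of_neg (by simp [hmem])]
      exact ih out1 (List.nodup_cons.mp hnd).2
    · rw [if_neg hmem, List.filter_cons_of_pos (by simp [hmem]),
        ih (out1 ++ [x]) (List.nodup_cons.mp hnd).2, List.append_assoc]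
      congr 1
      rw [show x :: List.filter (fun v => !decide (v ∈ out1)) p
            = [x] ++ List.filter (fun v => !decide (v ∈ out1)) p from rfl]
      congr 1
      apply List.filter_congr
      intro v hv
      have hvx : v ≠ x := fun e => hx (e ▸ hv)
      simp [List.mem_append, hvx]

def pvPref : List String :=
  ["control", "helpful_misdirection", "authority_nudge", "social_proof",
   "scarcity_pressure", "reciprocity_trade"]

def pvRank : PySem.Dict String Int :=
  (PySem.List.enumerate pvPref 0).foldl (fun d p => d.insert p.2 p.1) PySem.Dict.empty

theorem pvRank_mem (v : String) (hv : v ∈ pvPref) :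
    0 ≤ PySem.Dict.getD pvRank v 6 ∧ PySem.Dict.getD pvRank v 6 < 6 := by
  fin_cases hv <;> exact (by decide)

theorem pvRank_pairwise :
    pvPref.Pairwise (fun a b => PySem.Dict.getD pvRank a 6 < PySem.Dict.getD pvRank b 6) := by
  decide

theorem pvRank_not_mem (v : String) (h : v ∉ pvPref) : PySem.Dict.getD pvRank v 6 = 6 := by
  simp only [pvPref, List.mem_cons, List.not_mem_nil, or_false, not_or] at h
  obtain ⟨h1, h2, h3, h4, h5, h6⟩ := h
  have hr : pvRank = PySem.Dict.mk [("control", 0), ("helpful_misdirection", 1),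
      ("authority_nudge", 2), ("social_proof", 3), ("scarcity_pressure", 4),
      ("reciprocity_trade", 5)] := by decide
  rw [hr, PySem.Dict.getD_eq_get?_getD]
  simp [beq_iff_eq, Ne.symm h1, Ne.symm h2, Ne.symm h3,
    Ne.symm h4, Ne.symm h5, Ne.symm h6, PySem.Dict.get?]

theorem pvIdx_bounds (P : List String) (hnd : P.Nodup) (v : String) (hv : v ∈ P) :
    0 ≤ (pvDictOf P).getD v 0 ∧ (pvDictOf P).getD v 0 < (P.length : Int) := by
  obtain ⟨i, hi, e⟩ := List.mem_iff_getElem.mp hv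
  subst e
  rw [pvDictOf_getD P hnd i hi]
  exact ⟨Int.natCast_nonneg i, by exact_mod_cast hi⟩

theorem pvIdx_pairwise (P : List String) (hnd : P.Nodup) :
    P.Pairwise (fun a b => (pvDictOf P).getD a 0 < (pvDictOf P).getD b 0) := by
  rw [List.pairwise_iff_getElem]
  intro i j hi hj hij
  rw [pvDictOf_getD P hnd i hi, pvDictOf_getD P hnd j hj]
  exact_mod_cast hij

theorem pvSortedEq (P : List String) (hnd : P.Nodup) :
    PySem.List.sorted P
      (fun v => PySem.Dict.getD pvRank v 6 * ((P.length : Int) + 1) + PySem.Dict.getD (pvDictOf P) v 0)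
      false
    = pvPref.filter (fun v => decide (v ∈ P))
      ++ P.filter (fun v => !decide (v ∈ pvPref.filter (fun w => decide (w ∈ P)))) := by
  set key := fun v => PySem.Dict.getD pvRank v 6 * ((P.length : Int) + 1) + PySem.Dict.getD (pvDictOf P) v 0 with hkey
  have hR : P.filter (fun v => !decide (v ∈ pvPref.filter (fun w => decide (w ∈ P))))
      = P.filter (fun v => !decide (v ∈ pvPref)) := by
    apply List.filter_congr
    intro v hv
    simp [List.mem_filter, hv]
  rw [hR]
  have hndP : pvPref.Nodup := by decide
  apply PySem.List.sorted_eq_of_perm_of_pairwise_lt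
  · rw [List.perm_ext_iff_of_nodup]
    · intro a
      simp only [List.mem_append, List.mem_filter, decide_eq_true_eq, Bool.not_eq_eq_eq_not,
        Bool.not_true, decide_eq_false_iff_not]
      by_cases hp : a ∈ pvPref <;> by_cases hP : a ∈ P <;> simp [hp, hP]
    · rw [List.nodup_append]
      refine ⟨hndP.filter _, hnd.filter _, ?_⟩
      intro a ha b hb
      simp only [List.mem_filter, decide_eq_true_eq] at ha
      simp only [List.mem_filter, Bool.not_eq_eq_eq_not, Bool.not_true, decide_eq_false_iff_not] at hb
      exact fun e => hb.2 (e ▸ ha.1)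
    · exact hnd
  · rw [List.pairwise_append]
    refine ⟨?_, ?_, ?_⟩
    · -- within the preferred block: rank strictly increases
      refine List.Pairwise.imp_of_mem ?_ (pvRank_pairwise.filter _)
      intro a b ha hb hrank
      simp only [List.mem_filter, decide_eq_true_eq] at ha hb
      obtain ⟨ha0, ha1⟩ := pvIdx_bounds P hnd a ha.2
      obtain ⟨hb0, hb1⟩ := pvIdx_bounds P hnd b hb.2
      simp only [hkey]
      nlinarith [mul_le_mul_of_nonneg_right
        (show PySem.Dict.getD pvRank a 6 + 1 ≤ PySem.Dict.getD pvRank b 6 by omega)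
        (show (0:Int) ≤ (P.length : Int) + 1 by positivity)]
    · -- within the remainder: appearance index strictly increases, ranks both 6
      refine List.Pairwise.imp_of_mem ?_ ((pvIdx_pairwise P hnd).filter _)
      intro a b ha hb hidx
      simp only [List.mem_filter, Bool.not_eq_eq_eq_not, Bool.not_true, decide_eq_false_iff_not] at ha hb
      simp only [hkey, pvRank_not_mem a ha.2, pvRank_not_mem b hb.2]
      linarith
    · -- across: preferred block strictly before the remainder
      intro a ha b hb
      simp only [List.mem_filter, decide_eq_true_eq] at ha
      simp only [List.mem_filter, Bool.not_eq_eq_eq_not, Bool.not_true, decide_eq_false_iff_not] at hb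
      obtain ⟨ha0, ha1⟩ := pvIdx_bounds P hnd a ha.2
      obtain ⟨hb0, hb1⟩ := pvIdx_bounds P hnd b hb.1
      have hra := pvRank_mem a ha.1
      simp only [hkey, pvRank_not_mem b hb.2]
      nlinarith [mul_le_mul_of_nonneg_right
        (show PySem.Dict.getD pvRank a 6 + 1 ≤ 6 by omega)
        (show (0:Int) ≤ (P.length : Int) + 1 by positivity)]

theorem pvLoopCorr0 (rows : List (List (String × String))) :
    ∃ P : List String, P.Nodup ∧
      rows.foldl (fun ps r =>
        let v := pvGetVariant r
        if v = "" ∨ v ∈ ps.2 then ps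
        else (ps.1 ++ [v], PySem.Set.add ps.2 v)) (([] : List String), PySem.Set.empty) = (P, P) ∧
      rows.foldl (fun d r =>
        let v := pvGetVariant r
        if v ≠ "" ∧ d.contains v = false then d.insert v (d.size : Int) else d)
        PySem.Dict.empty = pvDictOf P := by
  obtain ⟨P, h1, h2, h3⟩ := pvLoopCorr rows [] List.nodup_nil
  exact ⟨P, h1, h2, h3⟩

theorem pvFinal (rows : List (List (String × String))) :
    variant_order_py rows = variant_order_py_alt rows := by
  unfold variant_order_py variant_order_py_alt
  obtain ⟨P, hnd, hA, hB⟩ := pvLoopCorr0 rows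
  simp only []
  rw [hA, hB]
  simp only [pvDictOf_keys, pvDictOf_size]
  have hout1 : (["control", "helpful_misdirection", "authority_nudge", "social_proof",
      "scarcity_pressure", "reciprocity_trade"] : List String).foldl
        (fun out v => if v ∈ P then out ++ [v] else out) []
      = pvPref.filter (fun v => decide (v ∈ P)) := by
    have h := PySem.List.foldl_append_if (fun v => decide (v ∈ P)) id
      (["control", "helpful_misdirection", "authority_nudge", "social_proof",
        "scarcity_pressure", "reciprocity_trade"] : List String) []
    simpa [pvPref] using h
  rw [hout1, pvFoldDedup P _ hnd]
  rw [show ((["control", "helpful_misdirection", "authority_nudge", "social_proof",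
      "scarcity_pressure", "reciprocity_trade"] : List String).length : Int) = (6:Int) from rfl]
  rw [show ((PySem.List.enumerate (["control", "helpful_misdirection", "authority_nudge",
      "social_proof", "scarcity_pressure", "reciprocity_trade"] : List String) 0).foldl
      (fun d p => d.insert p.2 p.1) PySem.Dict.empty) = pvRank from rfl]
  exact (pvSortedEq P hnd).symm

-- ===== VERDICT (by name: the statement is the Claim_ definition above) =====
theorem variant_order_py_spec : Claim_equal_variant_order_py := by
  intro rows _
  unfold Spec_variant_order_py
  exact pvFinal rows
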